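-- pv_equiv track=rewrite | github.com/rafa-moura02/rpg_front_olddragon | model/Atributos.py | descricao
-- ===== SOURCE A (Python) =====
-- def descricao(atributo, valor):
--     if valor is None:
--         return "Não definido"
--
--     descricoes = {
--         "forca": {(3, 8): "Fraco", (9, 12): "Mediano", (13, 16): "Forte", (17, 18): "Muito Forte"},
--         "destreza": {(3, 8): "Letárgico", (9, 12): "Mediano", (13, 16): "Ágil", (17, 18): "Preciso"},
--         "constituicao": {(3, 8): "Frágil", (9, 12): "Mediano", (13, 16): "Resistente", (17, 18): "Vigoroso"},
--         "inteligencia": {(3, 8): "Inepto", (9, 12): "Mediano", (13, 16): "Inteligente", (17, 18): "Gênio"},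
--         "sabedoria": {(3, 8): "Tolo", (9, 12): "Mediano", (13, 16): "Intuitivo", (17, 18): "Presciente"},
--         "carisma": {(3, 8): "Descortês", (9, 12): "Mediano", (13, 16): "Carismático", (17, 18): "Magnético"}
--     }
--
--     for (inicio, fim), desc in descricoes.get(atributo, {}).items():
--         if inicio <= valor <= fim:
--             return desc
--     return "Indefinido"
-- ===== SOURCE B (Python) =====
-- LABELS = {
--     "forca": ("Fraco", "Mediano", "Forte", "Muito Forte"),
--     "destreza": ("Letárgico", "Mediano", "Ágil", "Preciso"),
--     "constituicao": ("Frágil", "Mediano", "Resistente", "Vigoroso"),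
--     "inteligencia": ("Inepto", "Mediano", "Inteligente", "Gênio"),
--     "sabedoria": ("Tolo", "Mediano", "Intuitivo", "Presciente"),
--     "carisma": ("Descortês", "Mediano", "Carismático", "Magnético"),
-- }
--
--
-- def descricao(atributo, valor):
--     if valor is None:
--         return "Não definido"
--     names = LABELS.get(atributo)
--     if names is None or valor < 3 or valor > 18:
--         return "Indefinido"
--     if valor <= 8:
--         return names[0]
--     if valor <= 12:
--         return names[1]
--     if valor <= 16:
--         return names[2]
--     return names[3]
-- ===== Notes on version B (the rewrite author's own statement) =====
-- stated objective: simpler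
-- what changed: Replaces the per-attribute dict of (lo,hi)-range keys scanned linearly for a containing interval by a flat labels table plus a cascade of threshold comparisons picking the tier directly.
import Mathlib
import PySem

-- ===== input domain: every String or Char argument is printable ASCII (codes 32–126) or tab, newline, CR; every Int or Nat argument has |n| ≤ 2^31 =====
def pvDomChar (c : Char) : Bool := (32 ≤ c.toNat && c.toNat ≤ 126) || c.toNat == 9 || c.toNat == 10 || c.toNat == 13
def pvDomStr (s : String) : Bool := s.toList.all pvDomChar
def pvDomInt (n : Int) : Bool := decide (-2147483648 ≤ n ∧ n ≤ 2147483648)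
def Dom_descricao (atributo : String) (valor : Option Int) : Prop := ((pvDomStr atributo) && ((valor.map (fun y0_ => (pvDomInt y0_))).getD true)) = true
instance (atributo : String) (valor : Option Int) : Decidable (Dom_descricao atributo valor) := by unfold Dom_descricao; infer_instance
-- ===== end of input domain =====

-- B replaces A's scan over (lo, hi)-range keys with a labels lookup plus a threshold chain (simpler; no speed claim).

-- ===== PORT A =====
-- the `for ... : if ...: return desc` loop over the inner dict's items, with the `return "Indefinido"` fall-through
def descrLoop : List ((Int × Int) × String) → Int → String
  | [], _ => "Indefinido"
  | ((inicio, fim), desc) :: rest, valor =>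
      if inicio ≤ valor ∧ valor ≤ fim then desc else descrLoop rest valor

def descricao (atributo : String) (valor : Option Int) : String :=
  match valor with
  | none => "Não definido"
  | some v =>
    let descricoes : PySem.Dict String (PySem.Dict (Int × Int) String) :=
      PySem.Dict.ofList
        [ ("forca", PySem.Dict.ofList [((3,8),"Fraco"), ((9,12),"Mediano"), ((13,16),"Forte"), ((17,18),"Muito Forte")])
        , ("destreza", PySem.Dict.ofList [((3,8),"Letárgico"), ((9,12),"Mediano"), ((13,16),"Ágil"), ((17,18),"Preciso")])
        , ("constituicao", PySem.Dict.ofList [((3,8),"Frágil"), ((9,12),"Mediano"), ((13,16),"Resistente"), ((17,18),"Vigoroso")])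
        , ("inteligencia", PySem.Dict.ofList [((3,8),"Inepto"), ((9,12),"Mediano"), ((13,16),"Inteligente"), ((17,18),"Gênio")])
        , ("sabedoria", PySem.Dict.ofList [((3,8),"Tolo"), ((9,12),"Mediano"), ((13,16),"Intuitivo"), ((17,18),"Presciente")])
        , ("carisma", PySem.Dict.ofList [((3,8),"Descortês"), ((9,12),"Mediano"), ((13,16),"Carismático"), ((17,18),"Magnético")]) ]
    descrLoop (PySem.Dict.getD descricoes atributo (PySem.Dict.ofList [])).items v

-- ===== PORT B =====
-- module-level LABELS table of Source B
def pvLABELS : PySem.Dict String (String × String × String × String) :=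
  PySem.Dict.ofList
    [ ("forca", ("Fraco", "Mediano", "Forte", "Muito Forte"))
    , ("destreza", ("Letárgico", "Mediano", "Ágil", "Preciso"))
    , ("constituicao", ("Frágil", "Mediano", "Resistente", "Vigoroso"))
    , ("inteligencia", ("Inepto", "Mediano", "Inteligente", "Gênio"))
    , ("sabedoria", ("Tolo", "Mediano", "Intuitivo", "Presciente"))
    , ("carisma", ("Descortês", "Mediano", "Carismático", "Magnético")) ]

def descricao_alt (atributo : String) (valor : Option Int) : String :=
  match valor with
  | none => "Não definido"
  | some v =>
    match PySem.Dict.get? pvLABELS atributo with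
    | none => "Indefinido"
    | some names =>
      if v < 3 ∨ v > 18 then "Indefinido"
      else if v ≤ 8 then names.1
      else if v ≤ 12 then names.2.1
      else if v ≤ 16 then names.2.2.1
      else names.2.2.2

-- ===== PRECONDITION & SPEC =====
def Spec_descricao (atributo : String) (valor : Option Int) (out : String) : Prop := out = descricao_alt atributo valor
instance (atributo : String) (valor : Option Int) (out : String) : Decidable (Spec_descricao atributo valor out) := by unfold Spec_descricao; infer_instance

-- ===== CLAIM (what is proved, stated in full; the proofs are below) =====
def Claim_equal_descricao : Prop := ∀ (atributo : String) (valor : Option Int), Dom_descricao atributo valor → Spec_descricao atributo valor (descricao atributo valor)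

-- ===== LEMMAS AND PROOFS =====
theorem loop4 (a b c d : String) (v : Int) :
    descrLoop [((3,8),a), ((9,12),b), ((13,16),c), ((17,18),d)] v =
      if v < 3 ∨ v > 18 then "Indefinido"
      else if v ≤ 8 then a
      else if v ≤ 12 then b
      else if v ≤ 16 then c
      else d := by
  simp only [descrLoop]
  split_ifs <;> first | rfl | omega

-- ===== VERDICT (by name: the statement is the Claim_ definition above) =====
theorem descricao_spec : Claim_equal_descricao := by
  intro atributo valor _
  unfold Spec_descricao
  cases valor with
  | none => rfl
  | some v =>
    by_cases h1 : atributo = "forca"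
    · subst h1
      rw [show descricao "forca" (some v)
            = descrLoop [((3,8),"Fraco"), ((9,12),"Mediano"), ((13,16),"Forte"), ((17,18),"Muito Forte")] v from rfl,
          loop4]; rfl
    by_cases h2 : atributo = "destreza"
    · subst h2
      rw [show descricao "destreza" (some v)
            = descrLoop [((3,8),"Letárgico"), ((9,12),"Mediano"), ((13,16),"Ágil"), ((17,18),"Preciso")] v from rfl,
          loop4]; rfl
    by_cases h3 : atributo = "constituicao"
    · subst h3
      rw [show descricao "constituicao" (some v)
            = descrLoop [((3,8),"Frágil"), ((9,12),"Mediano"), ((13,16),"Resistente"), ((17,18),"Vigoroso")] v from rfl,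
          loop4]; rfl
    by_cases h4 : atributo = "inteligencia"
    · subst h4
      rw [show descricao "inteligencia" (some v)
            = descrLoop [((3,8),"Inepto"), ((9,12),"Mediano"), ((13,16),"Inteligente"), ((17,18),"Gênio")] v from rfl,
          loop4]; rfl
    by_cases h5 : atributo = "sabedoria"
    · subst h5
      rw [show descricao "sabedoria" (some v)
            = descrLoop [((3,8),"Tolo"), ((9,12),"Mediano"), ((13,16),"Intuitivo"), ((17,18),"Presciente")] v from rfl,
          loop4]; rfl
    by_cases h6 : atributo = "carisma"
    · subst h6
      rw [show descricao "carisma" (some v)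
            = descrLoop [((3,8),"Descortês"), ((9,12),"Mediano"), ((13,16),"Carismático"), ((17,18),"Magnético")] v from rfl,
          loop4]; rfl
    · show descrLoop (PySem.Dict.getD _ atributo (PySem.Dict.ofList [])).items v
        = match PySem.Dict.get? pvLABELS atributo with
          | none => "Indefinido"
          | some names =>
            if v < 3 ∨ v > 18 then "Indefinido"
            else if v ≤ 8 then names.1
            else if v ≤ 12 then names.2.1
            else if v ≤ 16 then names.2.2.1
            else names.2.2.2
      rw [PySem.Dict.getD_eq_get?_getD]
      have hA : PySem.Dict.get? (PySem.Dict.ofList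
        [ ("forca", PySem.Dict.ofList [(((3:Int),(8:Int)),"Fraco"), ((9,12),"Mediano"), ((13,16),"Forte"), ((17,18),"Muito Forte")])
        , ("destreza", PySem.Dict.ofList [((3,8),"Letárgico"), ((9,12),"Mediano"), ((13,16),"Ágil"), ((17,18),"Preciso")])
        , ("constituicao", PySem.Dict.ofList [((3,8),"Frágil"), ((9,12),"Mediano"), ((13,16),"Resistente"), ((17,18),"Vigoroso")])
        , ("inteligencia", PySem.Dict.ofList [((3,8),"Inepto"), ((9,12),"Mediano"), ((13,16),"Inteligente"), ((17,18),"Gênio")])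
        , ("sabedoria", PySem.Dict.ofList [((3,8),"Tolo"), ((9,12),"Mediano"), ((13,16),"Intuitivo"), ((17,18),"Presciente")])
        , ("carisma", PySem.Dict.ofList [((3,8),"Descortês"), ((9,12),"Mediano"), ((13,16),"Carismático"), ((17,18),"Magnético")]) ])
        atributo = none := by
        rw [show (PySem.Dict.ofList
        [ ("forca", PySem.Dict.ofList [(((3:Int),(8:Int)),"Fraco"), ((9,12),"Mediano"), ((13,16),"Forte"), ((17,18),"Muito Forte")])
        , ("destreza", PySem.Dict.ofList [((3,8),"Letárgico"), ((9,12),"Mediano"), ((13,16),"Ágil"), ((17,18),"Preciso")])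
        , ("constituicao", PySem.Dict.ofList [((3,8),"Frágil"), ((9,12),"Mediano"), ((13,16),"Resistente"), ((17,18),"Vigoroso")])
        , ("inteligencia", PySem.Dict.ofList [((3,8),"Inepto"), ((9,12),"Mediano"), ((13,16),"Inteligente"), ((17,18),"Gênio")])
        , ("sabedoria", PySem.Dict.ofList [((3,8),"Tolo"), ((9,12),"Mediano"), ((13,16),"Intuitivo"), ((17,18),"Presciente")])
        , ("carisma", PySem.Dict.ofList [((3,8),"Descortês"), ((9,12),"Mediano"), ((13,16),"Carismático"), ((17,18),"Magnético")]) ] : PySem.Dict String (PySem.Dict (Int × Int) String)) = PySem.Dict.mk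
        [ ("forca", PySem.Dict.ofList [(((3:Int),(8:Int)),"Fraco"), ((9,12),"Mediano"), ((13,16),"Forte"), ((17,18),"Muito Forte")])
        , ("destreza", PySem.Dict.ofList [((3,8),"Letárgico"), ((9,12),"Mediano"), ((13,16),"Ágil"), ((17,18),"Preciso")])
        , ("constituicao", PySem.Dict.ofList [((3,8),"Frágil"), ((9,12),"Mediano"), ((13,16),"Resistente"), ((17,18),"Vigoroso")])
        , ("inteligencia", PySem.Dict.ofList [((3,8),"Inepto"), ((9,12),"Mediano"), ((13,16),"Inteligente"), ((17,18),"Gênio")])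
        , ("sabedoria", PySem.Dict.ofList [((3,8),"Tolo"), ((9,12),"Mediano"), ((13,16),"Intuitivo"), ((17,18),"Presciente")])
        , ("carisma", PySem.Dict.ofList [((3,8),"Descortês"), ((9,12),"Mediano"), ((13,16),"Carismático"), ((17,18),"Magnético")]) ] from rfl]
        simp [PySem.Dict.get?, beq_iff_eq,
              Ne.symm h1, Ne.symm h2, Ne.symm h3, Ne.symm h4, Ne.symm h5, Ne.symm h6]
      have hB : PySem.Dict.get? pvLABELS atributo = none := by
        rw [show pvLABELS = PySem.Dict.mk
    [ ("forca", ("Fraco", "Mediano", "Forte", "Muito Forte"))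
    , ("destreza", ("Letárgico", "Mediano", "Ágil", "Preciso"))
    , ("constituicao", ("Frágil", "Mediano", "Resistente", "Vigoroso"))
    , ("inteligencia", ("Inepto", "Mediano", "Inteligente", "Gênio"))
    , ("sabedoria", ("Tolo", "Mediano", "Intuitivo", "Presciente"))
    , ("carisma", ("Descortês", "Mediano", "Carismático", "Magnético")) ] from rfl]
        simp [PySem.Dict.get?, beq_iff_eq,
              Ne.symm h1, Ne.symm h2, Ne.symm h3, Ne.symm h4, Ne.symm h5, Ne.symm h6]
      rw [hA, hB]; rfl
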